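-- pv_equiv track=rewrite | github.com/jayak0776/Accenture-Reinprep-Problems-Codes | RienPrep/P1AdvanceSubArray.py | basketBallScore
-- ===== SOURCE A (Python) =====
-- def basketBallScore(n,k,arr):
--     result=-1
--     subArraySum=0
--     for i in range(n-k+1):
--         c=1
--         for j in range(i,i+k):
--             subArraySum+=c*arr[j]
--             c+=1
--         result=max(subArraySum,result)
--         subArraySum=0
--     return result
-- ===== SOURCE B (Python) =====
-- def basketBallScore(n, k, arr):
--     windows = n - k + 1
--     if windows <= 0:
--         return -1
--     if k <= 0:
--         return 0
--     # first window: plain sum W and positionally-weighted sum S in one pass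
--     W = 0
--     S = 0
--     for j in range(k):
--         W += arr[j]
--         S += (j + 1) * arr[j]
--     best = max(S, -1)
--     # slide: S_i = S_{i-1} - W_{i-1} + k*arr[i+k-1], W_i = W_{i-1} - arr[i-1] + arr[i+k-1]
--     for i in range(1, windows):
--         new = arr[i + k - 1]
--         S += k * new - W
--         W += new - arr[i - 1]
--         if best < S:
--             best = S
--     return best
-- ===== Notes on version B (the rewrite author's own statement) =====
-- stated objective: alternative
-- what changed: Replaces A's per-window recomputation of the positionally-weighted sum (nested loops) by a single-pass sliding-window recurrence S_i = S_{i-1} - W_{i-1} + k*arr[i+k-1] that also maintains the plain window sum W.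
import Mathlib
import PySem

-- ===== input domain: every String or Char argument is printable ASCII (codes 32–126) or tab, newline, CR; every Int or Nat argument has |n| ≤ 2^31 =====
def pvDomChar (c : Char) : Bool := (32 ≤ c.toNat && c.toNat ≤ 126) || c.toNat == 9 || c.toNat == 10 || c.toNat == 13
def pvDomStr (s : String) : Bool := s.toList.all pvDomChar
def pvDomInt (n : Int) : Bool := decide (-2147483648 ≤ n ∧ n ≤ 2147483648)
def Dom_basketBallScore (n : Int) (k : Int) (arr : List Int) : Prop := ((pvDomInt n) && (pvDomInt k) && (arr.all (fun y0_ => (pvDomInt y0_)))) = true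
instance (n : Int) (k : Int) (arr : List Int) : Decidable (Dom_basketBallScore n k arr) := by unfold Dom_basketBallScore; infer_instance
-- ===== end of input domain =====

-- B replaces A's per-window recomputation of the weighted sum by a single-pass
-- sliding-window recurrence maintaining the plain window sum alongside (objective: alternative).

-- ===== PORT A =====
def basketBallScore (n : Int) (k : Int) (arr : List Int) : Int :=
  -- result=-1; subArraySum=0; for i in range(n-k+1): c=1; for j in range(i,i+k):
  --   subArraySum+=c*arr[j]; c+=1;  result=max(subArraySum,result); subArraySum=0
  ((PySem.List.pyRange 0 (n - k + 1) 1).foldl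
    (fun (st : Int × Int) i =>
      (max (((PySem.List.pyRange i (i + k) 1).foldl
               (fun (p : Int × Int) j => (p.1 + p.2 * PySem.List.pyGetD arr j 0, p.2 + 1))
               (st.2, 1)).1)
           st.1,
       0))
    (-1, 0)).1

-- ===== PORT B =====
def basketBallScore_alt (n : Int) (k : Int) (arr : List Int) : Int :=
  if n - k + 1 ≤ 0 then -1
  else if k ≤ 0 then 0
  else
    -- first window: W (plain sum) and S (weighted sum) in one pass
    let init := (PySem.List.pyRange 0 k 1).foldl
      (fun (p : Int × Int) j =>
        (p.1 + PySem.List.pyGetD arr j 0, p.2 + (j + 1) * PySem.List.pyGetD arr j 0))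
      (0, 0)
    -- slide: S_i = S_{i-1} - W_{i-1} + k*arr[i+k-1], W_i = W_{i-1} - arr[i-1] + arr[i+k-1]
    ((PySem.List.pyRange 1 (n - k + 1) 1).foldl
      (fun (st : Int × Int × Int) i =>
        let new := PySem.List.pyGetD arr (i + k - 1) 0
        let S := st.2.1 + (k * new - st.2.2)
        let W := st.2.2 + (new - PySem.List.pyGetD arr (i - 1) 0)
        (if st.1 < S then S else st.1, S, W))
      (max init.2 (-1), init.2, init.1)).1

-- ===== PRECONDITION & SPEC =====
-- Pre_ excludes exactly the inputs where the Python A raises IndexError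
-- (some window index reaches past the end of arr, i.e. 1 ≤ k ≤ n and n > len(arr)).
def Pre_basketBallScore (n : Int) (k : Int) (arr : List Int) : Prop :=
  n < k ∨ k ≤ 0 ∨ n ≤ (arr.length : Int)
instance (n : Int) (k : Int) (arr : List Int) : Decidable (Pre_basketBallScore n k arr) := by
  unfold Pre_basketBallScore; infer_instance

def pvWitness_basketBallScore : Int × Int × List Int := (4, 2, [1, -2, 3, 4])

def Spec_basketBallScore (n : Int) (k : Int) (arr : List Int) (out : Int) : Prop := out = basketBallScore_alt n k arr
instance (n : Int) (k : Int) (arr : List Int) (out : Int) : Decidable (Spec_basketBallScore n k arr out) := by unfold Spec_basketBallScore; infer_instance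

-- ===== CLAIM (what is proved, stated in full; the proofs are below) =====
def Claim_equal_basketBallScore : Prop := ∀ (n : Int) (k : Int) (arr : List Int), Dom_basketBallScore n k arr → Pre_basketBallScore n k arr → Spec_basketBallScore n k arr (basketBallScore n k arr)

-- ===== LEMMAS AND PROOFS =====

-- shorthand for the total element access both ports use
def wG (arr : List Int) (j : Int) : Int := PySem.List.pyGetD arr j 0

-- weighted window sum: m terms starting at index a, weights c, c+1, ...
def wS (arr : List Int) (a c : Int) : Nat → Int
  | 0 => 0
  | m + 1 => c * wG arr a + wS arr (a + 1) (c + 1) m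

-- plain window sum: m terms starting at index a
def wW (arr : List Int) (a : Int) : Nat → Int
  | 0 => 0
  | m + 1 => wG arr a + wW arr (a + 1) m

lemma wS_weight_succ (arr : List Int) : ∀ (m : Nat) (a c : Int),
    wS arr a (c + 1) m = wS arr a c m + wW arr a m := by
  intro m
  induction m with
  | zero => intro a c; simp [wS, wW]
  | succ m ih => intro a c; simp only [wS, wW, ih (a + 1) (c + 1)]; ring

lemma wS_append (arr : List Int) : ∀ (m : Nat) (a c : Int),
    wS arr a c (m + 1) = wS arr a c m + (c + (m : Int)) * wG arr (a + (m : Int)) := by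
  intro m
  induction m with
  | zero => intro a c; simp [wS]
  | succ m ih =>
      intro a c
      have h1 : wS arr a c (m + 1 + 1) = c * wG arr a + wS arr (a + 1) (c + 1) (m + 1) := rfl
      rw [h1, ih (a + 1) (c + 1)]
      have e : a + 1 + (m : Int) = a + ((m : Int) + 1) := by ring
      rw [e]
      have h2 : wS arr a c (m + 1) = c * wG arr a + wS arr (a + 1) (c + 1) m := rfl
      rw [h2]
      push_cast
      ring

lemma wW_append (arr : List Int) : ∀ (m : Nat) (a : Int),
    wW arr a (m + 1) = wW arr a m + wG arr (a + (m : Int)) := by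
  intro m
  induction m with
  | zero => intro a; simp [wW]
  | succ m ih =>
      intro a
      have h1 : wW arr a (m + 1 + 1) = wG arr a + wW arr (a + 1) (m + 1) := rfl
      rw [h1, ih (a + 1)]
      have e : a + 1 + (m : Int) = a + ((m : Int) + 1) := by ring
      rw [e]
      have h2 : wW arr a (m + 1) = wG arr a + wW arr (a + 1) m := rfl
      rw [h2]
      push_cast
      ring

-- the sliding recurrence for the weighted sum
lemma wS_shift (arr : List Int) (m : Nat) (a : Int) :
    wS arr a 1 (m + 1)
      = wS arr (a - 1) 1 (m + 1) - wW arr (a - 1) (m + 1) + ((m : Int) + 1) * wG arr (a + (m : Int)) := by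
  have h1 : wS arr (a - 1) 1 (m + 1) = 1 * wG arr (a - 1) + wS arr (a - 1 + 1) (1 + 1) m := rfl
  have h2 : wW arr (a - 1) (m + 1) = wG arr (a - 1) + wW arr (a - 1 + 1) m := rfl
  have e : a - 1 + 1 = a := by ring
  rw [e] at h1 h2
  rw [h1, h2, wS_append arr m a 1]
  have h3 : wS arr a (1 + 1) m = wS arr a 1 m + wW arr a m := wS_weight_succ arr m a 1
  rw [h3]
  ring

-- the sliding recurrence for the plain sum
lemma wW_shift (arr : List Int) (m : Nat) (a : Int) :
    wW arr a (m + 1)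
      = wW arr (a - 1) (m + 1) - wG arr (a - 1) + wG arr (a + (m : Int)) := by
  have h2 : wW arr (a - 1) (m + 1) = wG arr (a - 1) + wW arr (a - 1 + 1) m := rfl
  have e : a - 1 + 1 = a := by ring
  rw [e] at h2
  rw [h2, wW_append arr m a]
  ring

-- A's inner loop computes the weighted window sum
lemma innerA (arr : List Int) : ∀ (m : Nat) (a b s c : Int), (b - a).toNat = m →
    ((PySem.List.pyRange a b 1).foldl
       (fun (p : Int × Int) j => (p.1 + p.2 * PySem.List.pyGetD arr j 0, p.2 + 1)) (s, c)).1
      = s + wS arr a c m := by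
  intro m
  induction m with
  | zero =>
      intro a b s c h
      rw [PySem.List.pyRange_one_eq_nil (by omega)]
      simp [wS]
  | succ m ih =>
      intro a b s c h
      rw [PySem.List.pyRange_one_cons (by omega)]
      simp only [List.foldl_cons]
      rw [ih (a + 1) b _ _ (by omega)]
      simp only [wS, wG]
      ring

-- A's outer loop, main case (k = m+1 ≥ 1): fold of max over the window scores
lemma outerA (arr : List Int) (k : Int) (m : Nat) (hk : k = (m : Int) + 1) :
    ∀ (l : List Int) (r : Int),
    (l.foldl
      (fun (st : Int × Int) i =>
        (max (((PySem.List.pyRange i (i + k) 1).foldl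
                 (fun (p : Int × Int) j => (p.1 + p.2 * PySem.List.pyGetD arr j 0, p.2 + 1))
                 (st.2, 1)).1)
             st.1,
         0))
      (r, 0)).1
      = l.foldl (fun r i => max r (wS arr i 1 (m + 1))) r := by
  intro l
  induction l with
  | nil => intro r; rfl
  | cons i l ih =>
      intro r
      simp only [List.foldl_cons]
      rw [innerA arr (m + 1) i (i + k) 0 1 (by omega)]
      rw [ih (max (0 + wS arr i 1 (m + 1)) r)]
      rw [zero_add, max_comm]

-- A's outer loop when k ≤ 0: every window score is 0
lemma outerA0 (arr : List Int) (k : Int) (hk : k ≤ 0) :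
    ∀ (l : List Int) (r : Int),
    (l.foldl
      (fun (st : Int × Int) i =>
        (max (((PySem.List.pyRange i (i + k) 1).foldl
                 (fun (p : Int × Int) j => (p.1 + p.2 * PySem.List.pyGetD arr j 0, p.2 + 1))
                 (st.2, 1)).1)
             st.1,
         0))
      (r, 0)).1
      = l.foldl (fun r _ => max r 0) r := by
  intro l
  induction l with
  | nil => intro r; rfl
  | cons i l ih =>
      intro r
      simp only [List.foldl_cons]
      rw [PySem.List.pyRange_one_eq_nil (by omega : i + k ≤ i)]
      simp only [List.foldl_nil]
      rw [ih (max 0 r)]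
      rw [max_comm]

lemma foldl_max_keep (r : Int) (hr : 0 ≤ r) : ∀ (l : List Int),
    l.foldl (fun r _ => max r 0) r = r := by
  intro l
  induction l generalizing r with
  | nil => rfl
  | cons x l ih => simp only [List.foldl_cons, max_eq_left hr]; exact ih r hr

-- B's first pass computes both sums of window 0
lemma initB (arr : List Int) : ∀ (m : Nat) (a b w s : Int), (b - a).toNat = m →
    ((PySem.List.pyRange a b 1).foldl
       (fun (p : Int × Int) j =>
         (p.1 + PySem.List.pyGetD arr j 0, p.2 + (j + 1) * PySem.List.pyGetD arr j 0)) (w, s))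
      = (w + wW arr a m, s + wS arr a (a + 1) m) := by
  intro m
  induction m with
  | zero =>
      intro a b w s h
      rw [PySem.List.pyRange_one_eq_nil (by omega)]
      simp [wS, wW]
  | succ m ih =>
      intro a b w s h
      rw [PySem.List.pyRange_one_cons (by omega)]
      simp only [List.foldl_cons]
      rw [ih (a + 1) b _ _ (by omega)]
      simp only [wS, wW, wG, Prod.mk.injEq]
      exact ⟨by ring, by ring⟩

-- B's sliding loop maintains (best so far, S of the previous window, W of the previous window)
lemma loopB (arr : List Int) (k : Int) (m : Nat) (hk : k = (m : Int) + 1) :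
    ∀ (cnt : Nat) (a bnd best : Int), (bnd - a).toNat = cnt →
    ((PySem.List.pyRange a bnd 1).foldl
      (fun (st : Int × Int × Int) i =>
        (if st.1 < st.2.1 + (k * PySem.List.pyGetD arr (i + k - 1) 0 - st.2.2) then
           st.2.1 + (k * PySem.List.pyGetD arr (i + k - 1) 0 - st.2.2)
         else st.1,
         st.2.1 + (k * PySem.List.pyGetD arr (i + k - 1) 0 - st.2.2),
         st.2.2 + (PySem.List.pyGetD arr (i + k - 1) 0 - PySem.List.pyGetD arr (i - 1) 0)))
      (best, wS arr (a - 1) 1 (m + 1), wW arr (a - 1) (m + 1))).1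
      = (PySem.List.pyRange a bnd 1).foldl (fun r i => max r (wS arr i 1 (m + 1))) best := by
  intro cnt
  induction cnt with
  | zero =>
      intro a bnd best h
      rw [PySem.List.pyRange_one_eq_nil (by omega)]
      rfl
  | succ cnt ih =>
      intro a bnd best h
      rw [PySem.List.pyRange_one_cons (by omega)]
      simp only [List.foldl_cons]
      have ea : a + k - 1 = a + (m : Int) := by omega
      have eS : wS arr (a - 1) 1 (m + 1) + (k * PySem.List.pyGetD arr (a + k - 1) 0 - wW arr (a - 1) (m + 1))
          = wS arr a 1 (m + 1) := by
        rw [ea, hk, wS_shift arr m a]; simp only [wG]; ring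
      have eW : wW arr (a - 1) (m + 1) + (PySem.List.pyGetD arr (a + k - 1) 0 - PySem.List.pyGetD arr (a - 1) 0)
          = wW arr a (m + 1) := by
        rw [ea, wW_shift arr m a]; simp only [wG]; ring
      rw [eS, eW]
      rw [show (if best < wS arr a 1 (m + 1) then wS arr a 1 (m + 1) else best)
            = max best (wS arr a 1 (m + 1)) from by rw [Int.max_def]; split_ifs <;> omega]
      have ih' := ih (a + 1) bnd (max best (wS arr a 1 (m + 1))) (by omega)
      rw [show a + 1 - 1 = a from by ring] at ih'
      exact ih'

-- ===== VERDICT (by name: the statement is the Claim_ definition above) =====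
theorem basketBallScore_spec : Claim_equal_basketBallScore := by
  intro n k arr _ _
  unfold Spec_basketBallScore basketBallScore basketBallScore_alt
  by_cases hw : n - k + 1 ≤ 0
  · rw [if_pos hw, PySem.List.pyRange_one_eq_nil (by omega)]
    rfl
  · rw [if_neg hw]
    by_cases hk : k ≤ 0
    · rw [if_pos hk]
      rw [outerA0 arr k hk]
      rw [PySem.List.pyRange_one_cons (by omega : (0 : Int) < n - k + 1)]
      simp only [List.foldl_cons]
      exact foldl_max_keep _ (by omega) _
    · rw [if_neg hk]
      have hkm : k = (((k - 1).toNat : Int)) + 1 := by omega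
      set m : Nat := (k - 1).toNat with hm
      rw [outerA arr k m hkm]
      rw [initB arr (m + 1) 0 k 0 0 (by omega)]
      simp only [zero_add]
      have hB := loopB arr k m hkm (n - k + 1 - 1).toNat 1 (n - k + 1)
        (max (wS arr 0 1 (m + 1)) (-1)) rfl
      rw [show (1 : Int) - 1 = 0 from by ring] at hB
      rw [hB]
      rw [PySem.List.pyRange_one_cons (by omega : (0 : Int) < n - k + 1)]
      simp only [List.foldl_cons]
      rw [max_comm (-1) (wS arr 0 1 (m + 1))]
      norm_num
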